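-- pv_equiv track=rewrite | github.com/XinnuoXu/AggGen | Human_eva/scripts/Extract/Kappa.py | annotation_mapping
-- ===== SOURCE A (Python) =====
-- def annotation_mapping(relations, ann):
--     ann_split = ann.split('|')
--     map_dict = {}
--     for i, ann in enumerate(ann_split):
--         for item in ann.split('&'):
--             if item == '':
--                 continue
--             map_dict[item] = i
--     map_res = []
--     for item in relations:
--         if item not in map_dict:
--             map_res.append(-1)
--         else:
--             map_res.append(map_dict[item])
--     return map_res
-- ===== SOURCE B (Python) =====
-- def annotation_mapping(relations, ann):
--     groups = [g.split('&') for g in ann.split('|')]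
--     res = []
--     for item in relations:
--         idx = -1
--         for i, members in enumerate(groups):
--             if item != '' and item in members:
--                 idx = i
--         res.append(idx)
--     return res
-- ===== Notes on version B (the rewrite author's own statement) =====
-- stated objective: alternative
-- what changed: B drops the prebuilt relation->index dict entirely and instead, for each relation, scans the pre-split groups keeping the last group index whose '&'-members contain it (-1 if none).
import Mathlib
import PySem

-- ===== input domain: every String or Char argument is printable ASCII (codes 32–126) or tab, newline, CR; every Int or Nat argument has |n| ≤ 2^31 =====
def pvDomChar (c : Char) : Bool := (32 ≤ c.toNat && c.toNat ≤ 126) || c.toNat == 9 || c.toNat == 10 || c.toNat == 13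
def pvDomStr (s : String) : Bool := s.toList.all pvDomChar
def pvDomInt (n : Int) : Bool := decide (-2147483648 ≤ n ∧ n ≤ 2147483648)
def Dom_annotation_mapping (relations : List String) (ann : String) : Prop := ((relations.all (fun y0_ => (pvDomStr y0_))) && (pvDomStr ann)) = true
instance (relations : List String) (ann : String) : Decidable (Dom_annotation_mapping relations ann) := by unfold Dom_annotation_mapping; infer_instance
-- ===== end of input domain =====

-- B replaces A's prebuilt item->index dict with a per-relation last-match scan over the pre-split groups (alternative decomposition, same results).
-- ===== PORT A =====
def annotation_mapping (relations : List String) (ann : String) : List Int :=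
  let ann_split := PySem.Str.split? ann "|"
  let map_dict := (PySem.List.enumerate (ann_split.getD [])).foldl
    (fun d p =>
      ((PySem.Str.split? p.2 "&").getD []).foldl
        (fun d item => if item = "" then d else d.insert item p.1) d)
    PySem.Dict.empty
  relations.foldl
    (fun res item =>
      if map_dict.contains item = false then res ++ [(-1 : Int)]
      else res ++ [map_dict.getD item (-1)])
    []

-- ===== PORT B =====
def annotation_mapping_alt (relations : List String) (ann : String) : List Int :=
  let groups := ((PySem.Str.split? ann "|").getD []).map
    (fun g => (PySem.Str.split? g "&").getD [])
  relations.map (fun item =>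
    (PySem.List.enumerate groups).foldl
      (fun idx p => if item ≠ "" ∧ item ∈ p.2 then p.1 else idx) (-1 : Int))

-- ===== PRECONDITION & SPEC =====
def Spec_annotation_mapping (relations : List String) (ann : String) (out : List Int) : Prop := out = annotation_mapping_alt relations ann
instance (relations : List String) (ann : String) (out : List Int) : Decidable (Spec_annotation_mapping relations ann out) := by unfold Spec_annotation_mapping; infer_instance

-- ===== CLAIM (what is proved, stated in full; the proofs are below) =====
def Claim_equal_annotation_mapping : Prop := ∀ (relations : List String) (ann : String), Dom_annotation_mapping relations ann → Spec_annotation_mapping relations ann (annotation_mapping relations ann)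

-- ===== LEMMAS AND PROOFS =====

-- the inner insertion loop over one group's members, observed through get?
theorem inner_get (ms : List String) (d : PySem.Dict String Int) (i : Int) (item : String) :
    (ms.foldl (fun d it => if it = "" then d else d.insert it i) d).get? item
    = if item ≠ "" ∧ item ∈ ms then some i else d.get? item := by
  induction ms generalizing d with
  | nil => simp
  | cons m ms ih =>
    simp only [List.foldl_cons, ih]
    by_cases hm : m = ""
    · subst hm
      by_cases hi : item ∈ ms <;> by_cases he : item = "" <;> simp_all
    · rw [if_neg hm]
      by_cases heq : item = m
      · subst heq
        by_cases hi : item ∈ ms <;> simp_all [PySem.Dict.get?_insert_self]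
      · by_cases hi : item ∈ ms <;> by_cases he : item = "" <;>
          simp_all [PySem.Dict.get?_insert]

-- the whole dict-building loop, observed through get?
theorem build_get (l : List (Int × String)) (d : PySem.Dict String Int) (item : String) :
    (l.foldl (fun d p => ((PySem.Str.split? p.2 "&").getD []).foldl
        (fun d it => if it = "" then d else d.insert it p.1) d) d).get? item
    = l.foldl (fun (o : Option Int) p =>
        if item ≠ "" ∧ item ∈ (PySem.Str.split? p.2 "&").getD [] then some p.1 else o)
        (d.get? item) := by
  induction l generalizing d with
  | nil => rfl
  | cons p l ih => simp only [List.foldl_cons, ih, inner_get]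

theorem opt_shift {α : Type} (c : α → Prop) [DecidablePred c] (v : α → Int)
    (l : List α) (o : Option Int) :
    l.foldl (fun o p => if c p then some (v p) else o) o
    = match l.foldl (fun o p => if c p then some (v p) else o) none with
      | some w => some w | none => o := by
  induction l generalizing o with
  | nil => rfl
  | cons p l ih =>
    simp only [List.foldl_cons]
    rw [ih, ih (o := if c p then some (v p) else none)]
    cases hN : l.foldl (fun o p => if c p then some (v p) else o) none <;>
      by_cases hc : c p <;> simp [hc]

theorem int_of_opt {α : Type} (c : α → Prop) [DecidablePred c] (v : α → Int)
    (l : List α) (idx : Int) :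
    l.foldl (fun i p => if c p then v p else i) idx
    = (l.foldl (fun o p => if c p then some (v p) else o) none).getD idx := by
  induction l generalizing idx with
  | nil => rfl
  | cons p l ih =>
    simp only [List.foldl_cons]
    rw [ih, opt_shift c v l (if c p then some (v p) else none)]
    cases l.foldl (fun o p => if c p then some (v p) else o) none <;>
      by_cases hc : c p <;> simp [hc]

theorem enumerate_map {α β : Type} (f : α → β) (xs : List α) (s : Int) :
    PySem.List.enumerate (xs.map f) s
    = (PySem.List.enumerate xs s).map (fun p => (p.1, f p.2)) := by
  induction xs generalizing s with
  | nil => rfl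
  | cons x xs ih => simp [PySem.List.enumerate_cons, ih]

theorem foldl_if_append {α : Type} (c : α → Prop) [DecidablePred c] (f g : α → Int)
    (l : List α) (acc : List Int) :
    l.foldl (fun res item => if c item then res ++ [f item] else res ++ [g item]) acc
    = acc ++ l.map (fun item => if c item then f item else g item) := by
  induction l generalizing acc with
  | nil => simp
  | cons x l ih => by_cases h : c x <;> simp [h, ih]

-- ===== VERDICT (by name: the statement is the Claim_ definition above) =====
theorem annotation_mapping_spec : Claim_equal_annotation_mapping := by
  intro relations ann _
  show annotation_mapping relations ann = annotation_mapping_alt relations ann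
  unfold annotation_mapping annotation_mapping_alt
  rw [foldl_if_append (fun item =>
        ((PySem.List.enumerate ((PySem.Str.split? ann "|").getD [])).foldl
          (fun d p => ((PySem.Str.split? p.2 "&").getD []).foldl
            (fun d it => if it = "" then d else d.insert it p.1) d)
          PySem.Dict.empty).contains item = false)]
  rw [List.nil_append]
  apply List.map_congr_left
  intro item _
  rw [enumerate_map, List.foldl_map,
      int_of_opt (fun p : Int × String => item ≠ "" ∧ item ∈ (PySem.Str.split? p.2 "&").getD []) (fun p => p.1),
      PySem.Dict.getD_eq_get?_getD, PySem.Dict.contains_eq_isSome_get?, build_get,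
      PySem.Dict.get?_empty]
  cases (PySem.List.enumerate ((PySem.Str.split? ann "|").getD [])).foldl
      (fun (o : Option Int) p =>
        if item ≠ "" ∧ item ∈ (PySem.Str.split? p.2 "&").getD [] then some p.1 else o)
      none <;> simp
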